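-- pv_equiv track=rewrite | github.com/asirff399/OOP-Assignment-1 | S_Max_Split.py | maxSplit
-- ===== SOURCE A (Python) =====
-- def maxSplit(s):
--     cnt_l = 0
--     cnt_r = 0
--     balance = []
--     curr = ""
--
--     for c in s:
--         if c == 'L':
--             cnt_l += 1
--         elif c == 'R':
--             cnt_r += 1
--
--         curr += c
--
--         if cnt_l == cnt_r:
--             balance.append(curr)
--             curr = ""
--             cnt_l = 0
--             cnt_r = 0
--     return len(balance),balance
-- ===== SOURCE B (Python) =====
-- def maxSplit(s):
--     bal = 0
--     cuts = []
--     for i, c in enumerate(s):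
--         if c == 'L':
--             bal += 1
--         elif c == 'R':
--             bal -= 1
--         if bal == 0:
--             cuts.append(i + 1)
--     segs = [s[p:b] for p, b in zip([0] + cuts, cuts)]
--     return len(segs), segs
-- ===== Notes on version B (the rewrite author's own statement) =====
-- stated objective: alternative
-- what changed: B replaces A's single pass with per-segment L/R counters and a growing current string by a two-pass scheme: first record cut boundaries where the running L-minus-R balance returns to zero, then slice the string between consecutive boundaries.
import Mathlib
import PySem

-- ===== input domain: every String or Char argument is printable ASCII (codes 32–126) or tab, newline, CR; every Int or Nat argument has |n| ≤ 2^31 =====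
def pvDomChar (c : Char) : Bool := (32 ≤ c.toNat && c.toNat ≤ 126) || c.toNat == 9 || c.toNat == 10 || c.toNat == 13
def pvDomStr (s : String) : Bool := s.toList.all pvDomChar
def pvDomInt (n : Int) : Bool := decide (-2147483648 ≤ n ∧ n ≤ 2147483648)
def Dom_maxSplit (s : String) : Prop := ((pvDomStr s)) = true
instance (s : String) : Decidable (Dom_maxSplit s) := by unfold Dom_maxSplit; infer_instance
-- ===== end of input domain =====

-- B replaces A's single-pass counters-and-current-string by a two-pass scheme (cut boundaries
-- where the running balance hits zero, then slicing between consecutive boundaries); alternative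
-- decomposition, same asymptotic cost.


-- ===== PORT A =====
-- A's for loop, step for step; curr is carried as a List Char and wrapped with
-- String.ofList exactly when it is appended to `balance` (exact: Python str concatenation)
def maxSplitLoopA : List Char → Int → Int → List String → List Char → Int × Int × List String × List Char
  | [], cntL, cntR, balance, curr => (cntL, cntR, balance, curr)
  | c :: cs, cntL, cntR, balance, curr =>
    let cntL' := if c = 'L' then cntL + 1 else cntL
    let cntR' := if c = 'L' then cntR else if c = 'R' then cntR + 1 else cntR
    let curr' := curr ++ [c]
    if cntL' = cntR' then maxSplitLoopA cs 0 0 (balance ++ [String.ofList curr']) []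
    else maxSplitLoopA cs cntL' cntR' balance curr'

def maxSplit (s : String) : Int × List String :=
  let r := maxSplitLoopA s.toList 0 0 [] []
  ((r.2.2.1.length : Int), r.2.2.1)

-- ===== PORT B =====
-- first pass of B: running balance, recording the index just after each return to zero
def maxSplitLoopB : List (Int × Char) → Int → List Int → Int × List Int
  | [], bal, cuts => (bal, cuts)
  | ic :: es, bal, cuts =>
    let bal' := if ic.2 = 'L' then bal + 1 else if ic.2 = 'R' then bal - 1 else bal
    if bal' = 0 then maxSplitLoopB es bal' (cuts ++ [ic.1 + 1])
    else maxSplitLoopB es bal' cuts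

def maxSplit_alt (s : String) : Int × List String :=
  let cuts := (maxSplitLoopB (PySem.List.enumerate s.toList 0) 0 []).2
  let segs := ((0 :: cuts).zip cuts).map (fun pb => PySem.Str.slice s (some pb.1) (some pb.2))
  ((segs.length : Int), segs)

-- ===== PRECONDITION & SPEC =====
def Spec_maxSplit (s : String) (out : Int × List String) : Prop := out = maxSplit_alt s
instance (s : String) (out : Int × List String) : Decidable (Spec_maxSplit s out) := by unfold Spec_maxSplit; infer_instance

-- ===== CLAIM (what is proved, stated in full; the proofs are below) =====
def Claim_equal_maxSplit : Prop := ∀ (s : String), Dom_maxSplit s → Spec_maxSplit s (maxSplit s)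

-- ===== LEMMAS AND PROOFS =====

-- B's loop only appends to its cuts accumulator
theorem maxSplitLoopB_cuts (es : List (Int × Char)) :
    ∀ (bal : Int) (cuts : List Int),
      maxSplitLoopB es bal cuts
        = ((maxSplitLoopB es bal []).1, cuts ++ (maxSplitLoopB es bal []).2) := by
  induction es with
  | nil => intro bal cuts; simp [maxSplitLoopB]
  | cons ic es ih =>
    intro bal cuts
    simp only [maxSplitLoopB]
    generalize (if ic.2 = 'L' then bal + 1 else if ic.2 = 'R' then bal - 1 else bal) = b'
    split
    · rw [ih b' (cuts ++ [ic.1 + 1]), ih b' ([] ++ [ic.1 + 1])]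
      simp
    · exact ih b' cuts

-- the main invariant: the balance list A's loop ends with equals acc ++ the slices of `full`
-- between consecutive future cut boundaries of B's loop
theorem maxSplit_main (cs : List Char) :
    ∀ (full : List Char) (n p : Nat) (cntL cntR : Int) (acc : List String),
      full.drop n = cs → p ≤ n →
      (maxSplitLoopA cs cntL cntR acc ((full.drop p).take (n - p))).2.2.1
        = acc ++ ((((p : Int) :: (maxSplitLoopB (PySem.List.enumerate cs (n : Int)) (cntL - cntR) []).2).zip
              (maxSplitLoopB (PySem.List.enumerate cs (n : Int)) (cntL - cntR) []).2).map
            (fun pb => String.ofList (PySem.List.slice full (some pb.1) (some pb.2)))) := by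
  induction cs with
  | nil =>
    intro full n p cntL cntR acc _ _
    simp [maxSplitLoopA, maxSplitLoopB, PySem.List.enumerate_nil]
  | cons c cs ih =>
    intro full n p cntL cntR acc hdrop hpn
    have hn : n < full.length := by
      by_contra h
      simp [List.drop_eq_nil_of_le (le_of_not_gt h)] at hdrop
    have hfc : full[n] = c := by
      have h0 : (full.drop n)[0]'(by simp [hdrop]) = c := by simp [hdrop]
      rw [List.getElem_drop] at h0
      simpa using h0
    have hdrop' : full.drop (n + 1) = cs := by
      have := congrArg (List.drop 1) hdrop
      simpa [List.drop_drop, Nat.add_comm] using this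
    have hcurr : ∀ q : Nat, q ≤ n →
        (full.drop q).take (n + 1 - q) = (full.drop q).take (n - q) ++ [c] := by
      intro q hq
      rw [show n + 1 - q = (n - q) + 1 by omega, List.take_add_one]
      congr 1
      rw [List.getElem?_drop]
      simp [show q + (n - q) = n by omega, hn, hfc]
    -- one step of both loops, with the updated counters abstracted
    have key : ∀ (cntL' cntR' : Int),
        (if cntL' = cntR' then
            maxSplitLoopA cs 0 0 (acc ++ [String.ofList ((full.drop p).take (n - p) ++ [c])]) []
          else maxSplitLoopA cs cntL' cntR' acc ((full.drop p).take (n - p) ++ [c])).2.2.1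
          = acc ++ ((((p : Int) ::
                (if cntL' - cntR' = 0 then
                    maxSplitLoopB (PySem.List.enumerate cs ((n : Int) + 1)) (cntL' - cntR') ([] ++ [(n : Int) + 1])
                  else maxSplitLoopB (PySem.List.enumerate cs ((n : Int) + 1)) (cntL' - cntR') []).2).zip
              (if cntL' - cntR' = 0 then
                  maxSplitLoopB (PySem.List.enumerate cs ((n : Int) + 1)) (cntL' - cntR') ([] ++ [(n : Int) + 1])
                else maxSplitLoopB (PySem.List.enumerate cs ((n : Int) + 1)) (cntL' - cntR') []).2).map
            (fun pb => String.ofList (PySem.List.slice full (some pb.1) (some pb.2)))) := by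
      intro cntL' cntR'
      by_cases hc : cntL' = cntR'
      · rw [if_pos hc, if_pos (show cntL' - cntR' = 0 by omega)]
        rw [maxSplitLoopB_cuts]
        have ih' := ih full (n + 1) (n + 1) 0 0
          (acc ++ [String.ofList ((full.drop p).take (n - p) ++ [c])]) hdrop' (le_refl _)
        simp only [Nat.sub_self, List.take_zero, sub_zero, Nat.cast_add, Nat.cast_one] at ih'
        rw [ih']
        have hseg : PySem.List.slice full (some (p : Int)) (some ((n : Int) + 1))
            = (full.drop p).take (n - p) ++ [c] := by
          rw [show ((n : Int) + 1) = ((n + 1 : Nat) : Int) by push_cast; ring,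
            PySem.List.slice_natCast, hcurr p hpn]
        simp [hseg, hc]
      · rw [if_neg hc, if_neg (show ¬ cntL' - cntR' = 0 by omega)]
        have ih' := ih full (n + 1) p cntL' cntR' acc hdrop' (by omega)
        rw [hcurr p hpn] at ih'
        simp only [Nat.cast_add, Nat.cast_one] at ih'
        rw [ih']
    simp only [maxSplitLoopA, PySem.List.enumerate_cons, maxSplitLoopB]
    by_cases hL : c = 'L'
    · subst hL
      simp only [reduceIte]
      rw [show cntL - cntR + 1 = (cntL + 1) - cntR by ring]
      exact key (cntL + 1) cntR
    · by_cases hR : c = 'R'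
      · subst hR
        simp only [reduceIte, Char.reduceEq]
        rw [show cntL - cntR - 1 = cntL - (cntR + 1) by ring]
        exact key cntL (cntR + 1)
      · simp only [if_neg hL, if_neg hR]
        exact key cntL cntR

-- ===== VERDICT (by name: the statement is the Claim_ definition above) =====
theorem maxSplit_spec : Claim_equal_maxSplit := by
  intro s _
  unfold Spec_maxSplit maxSplit maxSplit_alt
  have h := maxSplit_main s.toList s.toList 0 0 0 0 [] (by simp) (le_refl 0)
  simp only [List.drop_zero, Nat.sub_self, List.take_zero, sub_zero, Nat.cast_zero,
    List.nil_append] at h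
  have hs : ∀ (a b : Option Int),
      PySem.Str.slice s a b = String.ofList (PySem.List.slice s.toList a b) := by
    intro a b
    rw [← String.ofList_toList (s := PySem.Str.slice s a b), PySem.Str.toList_slice,
      PySem.Chars.slice_eq_listSlice]
  simp only [h, hs]
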